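-- pv_equiv track=rewrite | github.com/JRChow/Analogia | code/parse/StoryMatch.py | number_named_entities
-- ===== SOURCE A (Python) =====
-- def number_named_entities(named_entities):
--     """
--     Assign numbers to named entities by type.
--     :param named_entities: a list of named entities (each as a dictionary)
--     :return: a list of named entities with numbered types
--     """
--     ne_list = [d['ner'] for d in named_entities]
--     ne_count = dict((ner, 0) for ner in ne_list)
--     for entity in named_entities:
--         entity_type = entity['ner']
--         entity['ner'] += str(ne_count[entity_type])
--         ne_count[entity_type] += 1
--     return named_entities
-- ===== SOURCE B (Python) =====
-- def number_named_entities(named_entities):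
--     """
--     Assign numbers to named entities by type.
--     :param named_entities: a list of named entities (each as a dictionary)
--     :return: a list of named entities with numbered types
--     """
--     groups = {}
--     for idx, entity in enumerate(named_entities):
--         groups.setdefault(entity['ner'], []).append(idx)
--     for idxs in groups.values():
--         for i, idx in enumerate(idxs):
--             entity = named_entities[idx]
--             entity['ner'] += str(i)
--     return named_entities
-- ===== Notes on version B (the rewrite author's own statement) =====
-- stated objective: alternative
-- what changed: Replaces A's single pass with a running per-type counter dict by a two-stage group-by algorithm: first group entity indices by their 'ner' type into a dict of lists, then number each group's entities by their enumerate position within the group.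
import Mathlib
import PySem

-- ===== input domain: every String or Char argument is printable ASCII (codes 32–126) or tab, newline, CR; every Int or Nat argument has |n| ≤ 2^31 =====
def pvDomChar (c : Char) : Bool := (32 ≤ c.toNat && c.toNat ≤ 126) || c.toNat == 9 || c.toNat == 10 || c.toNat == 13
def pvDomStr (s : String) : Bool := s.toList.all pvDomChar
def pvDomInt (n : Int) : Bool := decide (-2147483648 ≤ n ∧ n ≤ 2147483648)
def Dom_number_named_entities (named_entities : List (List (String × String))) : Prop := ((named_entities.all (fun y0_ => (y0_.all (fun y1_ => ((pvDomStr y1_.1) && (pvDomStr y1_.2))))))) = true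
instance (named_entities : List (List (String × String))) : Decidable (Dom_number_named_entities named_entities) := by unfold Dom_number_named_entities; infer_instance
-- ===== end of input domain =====

-- B replaces A's single counting pass (running counter dict) by a two-stage group-by:
-- group entity indices by type, then number each group by enumerate position (objective:
-- alternative algorithm, same cost). Both Pythons mutate the entity dicts in place and
-- return the same list object; the theorems are about the return value.

-- ===== PORT A =====
-- A: builds ne_list, initialises a counter dict to 0 for every type, then one pass that
-- appends str(count) to each entity's 'ner' and increments the counter.
def number_named_entities (named_entities : List (List (String × String))) : List (List (String × String)) :=
  let ne_list := named_entities.map (fun d => (PySem.Dict.mk d).getD "ner" "")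
  let ne_count : PySem.Dict String Int := ne_list.foldl (fun c t => c.insert t 0) PySem.Dict.empty
  (named_entities.foldl
    (fun (st : PySem.Dict String Int × List (List (String × String))) entity =>
      let entity_type := (PySem.Dict.mk entity).getD "ner" ""
      let n := st.1.getD entity_type 0
      (st.1.insert entity_type (n + 1),
       st.2 ++ [((PySem.Dict.mk entity).insert "ner" (entity_type ++ PySem.Int.toStr n)).items]))
    (ne_count, [])).2

-- ===== PORT B =====
-- B: phase 1 groups entity indices by 'ner' type (setdefault-append = Dict.modify with
-- default []); phase 2 walks the groups and numbers each group's entities by enumerate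
-- position, mutating the list at each stored index (always in range by construction,
-- so pyGetD/pySetD with their defaults are exact here).
def number_named_entities_alt (named_entities : List (List (String × String))) : List (List (String × String)) :=
  let groups : PySem.Dict String (List Int) :=
    (PySem.List.enumerate named_entities).foldl
      (fun g q => g.modify ((PySem.Dict.mk q.2).getD "ner" "") [] (· ++ [q.1]))
      PySem.Dict.empty
  groups.values.foldl
    (fun cur idxs =>
      (PySem.List.enumerate idxs).foldl
        (fun cur q =>
          let entity := PySem.List.pyGetD cur q.2 []
          PySem.List.pySetD cur q.2
            (((PySem.Dict.mk entity).insert "ner"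
               ((PySem.Dict.mk entity).getD "ner" "" ++ PySem.Int.toStr q.1)).items))
        cur)
    named_entities

-- ===== PRECONDITION & SPEC =====
-- Pre_ excludes exactly the inputs where A raises KeyError: an entity without a 'ner' key.
def Pre_number_named_entities (named_entities : List (List (String × String))) : Prop :=
  ∀ d ∈ named_entities, "ner" ∈ d.map Prod.fst
instance (named_entities : List (List (String × String))) : Decidable (Pre_number_named_entities named_entities) := by unfold Pre_number_named_entities; infer_instance
def pvWitness_number_named_entities : (List (List (String × String))) :=
  [[("ner", "PERSON"), ("text", "Ada")], [("ner", "LOC")], [("ner", "PERSON")]]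

def Spec_number_named_entities (named_entities : List (List (String × String))) (out : List (List (String × String))) : Prop := out = number_named_entities_alt named_entities
instance (named_entities : List (List (String × String))) (out : List (List (String × String))) : Decidable (Spec_number_named_entities named_entities out) := by unfold Spec_number_named_entities; infer_instance

-- ===== CLAIM (what is proved, stated in full; the proofs are below) =====
def Claim_equal_number_named_entities : Prop := ∀ (named_entities : List (List (String × String))), Dom_number_named_entities named_entities → Pre_number_named_entities named_entities → Spec_number_named_entities named_entities (number_named_entities named_entities)

-- ===== LEMMAS AND PROOFS =====

-- the original 'ner' type of an entity, and the rewritten entity (type ++ str i)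
def pvTypeOf (d : List (String × String)) : String := (PySem.Dict.mk d).getD "ner" ""
def pvUpd (d : List (String × String)) (i : Int) : List (String × String) :=
  ((PySem.Dict.mk d).insert "ner" (pvTypeOf d ++ PySem.Int.toStr i)).items

-- reference recursion: entity's number = count of its type among the earlier types 'pre'
def pvBrec (pre : List String) : List (List (String × String)) → List (List (String × String))
  | [] => []
  | d :: rest => pvUpd d ((pre.count (pvTypeOf d) : Int)) :: pvBrec (pre ++ [pvTypeOf d]) rest

-- ---- A = pvBrec ----
lemma init_counter_getD (l : List String) (c : PySem.Dict String Int)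
    (h : ∀ t, c.getD t 0 = 0) (t : String) :
    (l.foldl (fun c t => c.insert t 0) c).getD t 0 = 0 := by
  induction l generalizing c with
  | nil => exact h t
  | cons x xs ih =>
    simp only [List.foldl_cons]
    exact ih _ (fun t => by rw [PySem.Dict.getD_insert]; split <;> simp [h])

lemma foldA_eq_brec (l : List (List (String × String)))
    (c : PySem.Dict String Int) (acc : List (List (String × String))) (pre : List String)
    (h : ∀ t, c.getD t 0 = (pre.count t : Int)) :
    (l.foldl
      (fun (st : PySem.Dict String Int × List (List (String × String))) entity =>
        let entity_type := (PySem.Dict.mk entity).getD "ner" ""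
        let n := st.1.getD entity_type 0
        (st.1.insert entity_type (n + 1),
         st.2 ++ [((PySem.Dict.mk entity).insert "ner" (entity_type ++ PySem.Int.toStr n)).items]))
      (c, acc)).2 = acc ++ pvBrec pre l := by
  induction l generalizing c acc pre with
  | nil => simp [pvBrec]
  | cons d rest ih =>
    simp only [List.foldl_cons, pvBrec]
    rw [ih _ _ (pre ++ [pvTypeOf d])]
    · simp [pvUpd, pvTypeOf, h]
    · intro t
      rw [PySem.Dict.getD_insert]
      split
      · subst t; simp [h, pvTypeOf]
      · rename_i hne
        have hne' : ¬ pvTypeOf d = t := fun hc => hne hc.symm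
        simp [h, List.count_append, hne']

-- ---- elementwise characterisation of pvBrec ----
lemma pvBrec_getElem? (l : List (List (String × String))) :
    ∀ (pre : List String) (k : Nat),
      (pvBrec pre l)[k]? =
        l[k]?.map (fun d =>
          pvUpd d ((((pre ++ l.map pvTypeOf).take (pre.length + k)).count (pvTypeOf d) : Int))) := by
  induction l with
  | nil => intro pre k; simp [pvBrec]
  | cons d rest ih =>
    intro pre k
    cases k with
    | zero =>
      simp [pvBrec]
    | succ k =>
      simp only [pvBrec, List.getElem?_cons_succ]
      rw [ih (pre ++ [pvTypeOf d]) k]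
      simp [List.append_assoc, Nat.add_assoc, Nat.add_comm 1 k]

-- ---- the group of a type: its indices in order ----
def pvIdxs (t : String) : List String → Int → List Int
  | [], _ => []
  | x :: r, k => if x = t then k :: pvIdxs t r (k + 1) else pvIdxs t r (k + 1)

lemma mem_pvIdxs (t : String) (ts : List String) :
    ∀ (k : Int) (j : Int),
      j ∈ pvIdxs t ts k ↔ ∃ m : Nat, ts[m]? = some t ∧ j = k + m := by
  induction ts with
  | nil => intro k j; simp [pvIdxs]
  | cons x r ih =>
    intro k j
    constructor
    · intro hj
      simp only [pvIdxs] at hj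
      split at hj
      · rcases List.mem_cons.mp hj with h | h
        · exact ⟨0, by simp [*], by omega⟩
        · rcases (ih (k+1) j).mp h with ⟨m, hm, he⟩
          exact ⟨m + 1, by simpa using hm, by push_cast; omega⟩
      · rcases (ih (k+1) j).mp hj with ⟨m, hm, he⟩
        exact ⟨m + 1, by simpa using hm, by push_cast; omega⟩
    · rintro ⟨m, hm, rfl⟩
      cases m with
      | zero =>
        simp only [List.getElem?_cons_zero, Option.some.injEq] at hm
        simp [pvIdxs, hm]
      | succ m =>
        simp only [List.getElem?_cons_succ] at hm
        have hmem := (ih (k+1) (k + 1 + m)).mpr ⟨m, hm, rfl⟩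
        have heq : k + ((m+1 : Nat) : Int) = k + 1 + m := by push_cast; ring
        rw [heq]
        simp only [pvIdxs]
        split
        · exact List.mem_cons_of_mem _ hmem
        · exact hmem

-- every member of a group is ≥ its start
lemma pvIdxs_ge (t : String) (ts : List String) :
    ∀ (k : Int) (j : Int), j ∈ pvIdxs t ts k → k ≤ j := by
  intro k j hj
  rcases (mem_pvIdxs t ts k j).mp hj with ⟨m, _, rfl⟩
  omega

lemma pvIdxs_nodup (t : String) (ts : List String) :
    ∀ (k : Int), (pvIdxs t ts k).Nodup := by
  induction ts with
  | nil => intro k; simp [pvIdxs]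
  | cons x r ih =>
    intro k
    simp only [pvIdxs]
    split
    · refine List.nodup_cons.mpr ⟨fun hk => ?_, ih (k+1)⟩
      have := pvIdxs_ge t r (k+1) k hk
      omega
    · exact ih (k+1)

-- enumerate over a group: position i = count of t among the earlier types
lemma pvIdxs_enum (t : String) (ts : List String) :
    ∀ (pre : List String) (p : Int × Int),
      p ∈ PySem.List.enumerate (pvIdxs t ts (pre.length : Int)) ((pre.count t : Int)) →
      0 ≤ p.2 ∧ p.2.toNat < (pre ++ ts).length ∧ (pre ++ ts)[p.2.toNat]? = some t ∧
        p.1 = (((pre ++ ts).take p.2.toNat).count t : Int) := by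
  induction ts with
  | nil => intro pre p hp; simp [pvIdxs, PySem.List.enumerate_nil] at hp
  | cons x r ih =>
    intro pre p hp
    simp only [pvIdxs] at hp
    by_cases hx : x = t
    · rw [if_pos hx] at hp
      rw [PySem.List.enumerate_cons] at hp
      rcases List.mem_cons.mp hp with rfl | hp
      · refine ⟨by positivity, ?_, ?_, ?_⟩
        · simp
        · simp only [Int.toNat_natCast]
          rw [List.getElem?_append_right (le_refl _)]
          simp [hx]
        · simp only [Int.toNat_natCast]
          rw [List.take_left]
      · have hlen : ((pre.length : Int) + 1) = (((pre ++ [x]).length : Int)) := by simp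
        have hcnt : ((pre.count t : Int) + 1) = (((pre ++ [x]).count t : Int)) := by
          simp [List.count_append, hx]
        rw [hlen, hcnt] at hp
        have := ih (pre ++ [x]) p hp
        simpa [List.append_assoc] using this
    · rw [if_neg hx] at hp
      have hlen : ((pre.length : Int) + 1) = (((pre ++ [x]).length : Int)) := by simp
      have hcnt : ((pre.count t : Int)) = (((pre ++ [x]).count t : Int)) := by
        simp [List.count_append, hx]
      rw [hlen, hcnt] at hp
      have := ih (pre ++ [x]) p hp
      simpa [List.append_assoc] using this

-- the type at a group member's index is t
lemma pvIdxs_type (t : String) (ts : List String) (j : Int) (hj : j ∈ pvIdxs t ts 0) :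
    ts[j.toNat]? = some t := by
  rcases (mem_pvIdxs t ts 0 j).mp hj with ⟨m, hm, rfl⟩
  simpa using hm

-- ---- the set-fold: distinct in-range assignments, elementwise ----
lemma pvSetFold {E : Type} (F : E → Int → E) (g : Nat → E) (base : List E) (dflt : E) :
    ∀ (ps : List (Int × Int)) (cur : List E),
      cur.length = base.length →
      (ps.map (·.2)).Nodup →
      (∀ p ∈ ps, 0 ≤ p.2 ∧ p.2.toNat < base.length) →
      (∀ p ∈ ps, cur[p.2.toNat]? = base[p.2.toNat]?) →
      (∀ p ∈ ps, ∀ e, base[p.2.toNat]? = some e → F e p.1 = g p.2.toNat) →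
      ∀ k : Nat,
        (ps.foldl (fun c q => PySem.List.pySetD c q.2 (F (PySem.List.pyGetD c q.2 dflt) q.1)) cur)[k]? =
          if (k : Int) ∈ ps.map (·.2) then some (g k) else cur[k]? := by
  intro ps
  induction ps with
  | nil => intro cur _ _ _ _ _ k; simp
  | cons q rest ih =>
    intro cur hlen hnd hrange hcur hF k
    obtain ⟨hq0, hqlt⟩ := hrange q (List.mem_cons_self ..)
    have hqcur : q.2.toNat < cur.length := by omega
    have hget : PySem.List.pyGetD cur q.2 dflt = cur[q.2.toNat] :=
      PySem.List.pyGetD_eq_getElem cur dflt hq0 (by omega)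
    have hbase : base[q.2.toNat]? = some cur[q.2.toNat] := by
      rw [← hcur q (List.mem_cons_self ..)]; simp [hqcur]
    have hval : F (PySem.List.pyGetD cur q.2 dflt) q.1 = g q.2.toNat := by
      rw [hget]; exact hF q (List.mem_cons_self ..) _ hbase
    have hset : PySem.List.pySetD cur q.2 (F (PySem.List.pyGetD cur q.2 dflt) q.1)
        = cur.set q.2.toNat (g q.2.toNat) := by
      rw [PySem.List.pySetD_of_nonneg _ _ hq0, hval]
    simp only [List.foldl_cons, hset]
    have hnd' : (rest.map (·.2)).Nodup := (List.nodup_cons.mp hnd).2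
    have hqnot : q.2 ∉ rest.map (·.2) := (List.nodup_cons.mp hnd).1
    rw [ih (cur.set q.2.toNat (g q.2.toNat)) (by simpa using hlen) hnd'
      (fun p hp => hrange p (List.mem_cons_of_mem _ hp))
      (fun p hp => by
        have hne : p.2 ≠ q.2 := fun he => hqnot (he ▸ List.mem_map_of_mem hp)
        have hp0 := (hrange p (List.mem_cons_of_mem _ hp)).1
        have : p.2.toNat ≠ q.2.toNat := by omega
        rw [List.getElem?_set_ne (fun h => this h.symm)]
        exact hcur p (List.mem_cons_of_mem _ hp))
      (fun p hp => hF p (List.mem_cons_of_mem _ hp)) k]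
    simp only [List.map_cons, List.mem_cons]
    by_cases hkr : (k : Int) ∈ rest.map (·.2)
    · simp [hkr]
    · simp only [hkr, if_false, or_false]
      by_cases hkq : (k : Int) = q.2
      · have : k = q.2.toNat := by omega
        subst this
        simp [hkq, hqcur]
      · have : q.2.toNat ≠ k := by omega
        rw [if_neg hkq, List.getElem?_set_ne this]

-- ---- phase 1: the groups dict, characterised ----
lemma pvPairs_filter (t : String) (ne : List (List (String × String))) :
    ∀ (k : Int),
      ((((PySem.List.enumerate ne k).map (fun q => (pvTypeOf q.2, q.1))).filter
          (fun p => p.1 == t)).map (·.2)) = pvIdxs t (ne.map pvTypeOf) k := by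
  induction ne with
  | nil => intro k; simp [PySem.List.enumerate_nil, pvIdxs]
  | cons d rest ih =>
    intro k
    rw [PySem.List.enumerate_cons]
    simp only [List.map_cons, List.filter_cons, pvIdxs]
    by_cases h : pvTypeOf d = t
    · simp [h, ih]
    · simp [h, beq_eq_false_iff_ne.mpr h, ih]

lemma pvGroups_getD (ne : List (List (String × String))) (t : String) :
    (((PySem.List.enumerate ne).foldl
        (fun g q => g.modify ((PySem.Dict.mk q.2).getD "ner" "") [] (· ++ [q.1]))
        PySem.Dict.empty : PySem.Dict String (List Int))).getD t []
      = pvIdxs t (ne.map pvTypeOf) 0 := by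
  have h := PySem.Dict.getD_foldl_modify_append
    (l := (PySem.List.enumerate ne).map (fun q => (pvTypeOf q.2, q.1)))
    (d := (PySem.Dict.empty : PySem.Dict String (List Int))) (c := t)
  rw [List.foldl_map] at h
  have h2 : ((PySem.Dict.empty : PySem.Dict String (List Int)).getD t []) ++
      ((((PySem.List.enumerate ne).map (fun q => (pvTypeOf q.2, q.1))).filter
        (fun p => p.1 == t)).map (·.2)) = pvIdxs t (ne.map pvTypeOf) 0 := by
    rw [PySem.Dict.getD_empty]
    simpa using pvPairs_filter t ne 0
  exact h.trans h2

lemma pvGroups_keys (ne : List (List (String × String))) :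
    (((PySem.List.enumerate ne).foldl
        (fun g q => g.modify ((PySem.Dict.mk q.2).getD "ner" "") [] (· ++ [q.1]))
        PySem.Dict.empty : PySem.Dict String (List Int))).keys
      = PySem.Set.ofList (ne.map pvTypeOf) := by
  rw [PySem.Dict.keys_foldl_modify_key]
  have : (PySem.List.enumerate ne).map (fun q => (PySem.Dict.mk q.2).getD "ner" "")
      = ne.map pvTypeOf := by
    have := PySem.List.map_snd_enumerate ne 0
    calc (PySem.List.enumerate ne).map (fun q => (PySem.Dict.mk q.2).getD "ner" "")
        = ((PySem.List.enumerate ne).map (·.2)).map pvTypeOf := by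
          rw [List.map_map]; rfl
      _ = ne.map pvTypeOf := by rw [this]
  rw [this]
  simp [PySem.Dict.keys_empty, PySem.Set.update_nil_left]

-- ===== VERDICT (by name: the statement is the Claim_ definition above) =====
theorem number_named_entities_spec : Claim_equal_number_named_entities := by
  intro ne _ _
  unfold Spec_number_named_entities
  -- A-side: A = pvBrec [] ne
  have hA : number_named_entities ne = pvBrec [] ne := by
    unfold number_named_entities
    rw [foldA_eq_brec _ _ _ [] (fun t => init_counter_getD _ _ (fun t => by simp) t)]
    exact List.nil_append _
  generalize hT : ne.map pvTypeOf = types at *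
  have hlenT : types.length = ne.length := by rw [← hT]; exact List.length_map ..
  have hnd : (PySem.Set.ofList types).Nodup := PySem.Set.nodup_ofList types
  -- B-side: the groups dict's values, flattened into (position, index) pairs
  have hvals :
      (((PySem.List.enumerate ne).foldl
        (fun g q => g.modify ((PySem.Dict.mk q.2).getD "ner" "") [] (· ++ [q.1]))
        PySem.Dict.empty : PySem.Dict String (List Int))).values
      = (PySem.Set.ofList types).map (fun t => pvIdxs t types 0) := by
    have hkeys := pvGroups_keys ne
    rw [hT] at hkeys
    rw [PySem.Dict.values_eq_map_keys _ (by rw [hkeys]; exact hnd) [], hkeys]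
    refine List.map_congr_left (fun t _ => ?_)
    rw [pvGroups_getD ne t, hT]
  have hB1 : number_named_entities_alt ne
      = List.foldl
          (fun cur q =>
            PySem.List.pySetD cur q.2
              (((PySem.Dict.mk (PySem.List.pyGetD cur q.2 [])).insert "ner"
                ((PySem.Dict.mk (PySem.List.pyGetD cur q.2 [])).getD "ner" "" ++ PySem.Int.toStr q.1)).items))
          ne
          (((PySem.Set.ofList types).map (fun t => PySem.List.enumerate (pvIdxs t types 0))).flatten) := by
    show (((PySem.List.enumerate ne).foldl
        (fun g q => g.modify ((PySem.Dict.mk q.2).getD "ner" "") [] (· ++ [q.1]))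
        PySem.Dict.empty : PySem.Dict String (List Int))).values.foldl
      (fun cur idxs =>
        (PySem.List.enumerate idxs).foldl
          (fun cur q =>
            PySem.List.pySetD cur q.2
              (((PySem.Dict.mk (PySem.List.pyGetD cur q.2 [])).insert "ner"
                ((PySem.Dict.mk (PySem.List.pyGetD cur q.2 [])).getD "ner" "" ++ PySem.Int.toStr q.1)).items))
          cur) ne = _
    rw [hvals, List.foldl_flatten, List.foldl_map, List.foldl_map]
  set ps := (((PySem.Set.ofList types).map (fun t => PySem.List.enumerate (pvIdxs t types 0))).flatten)
    with hps
  -- every pair: nonneg in-range index, whose type is t, position = prefix count of t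
  have hmem : ∀ p ∈ ps, 0 ≤ p.2 ∧ p.2.toNat < types.length ∧
      types[p.2.toNat]? = some (types.getD p.2.toNat "") ∧
      p.1 = (((types.take p.2.toNat).count (types.getD p.2.toNat "") : Int)) := by
    intro p hp
    rw [hps, List.mem_flatten] at hp
    obtain ⟨l, hl, hpl⟩ := hp
    obtain ⟨t, _, rfl⟩ := List.mem_map.mp hl
    have hfacts := pvIdxs_enum t types [] p (by simpa using hpl)
    simp only [List.nil_append] at hfacts
    obtain ⟨h0, h1, h2, h3⟩ := hfacts
    have hg : types.getD p.2.toNat "" = t := by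
      rw [List.getD_eq_getElem?_getD, h2]
      rfl
    exact ⟨h0, h1, by rw [hg]; exact h2, by rw [hg]; exact h3⟩
  have hps2 : ps.map (·.2) = ((PySem.Set.ofList types).map (fun t => pvIdxs t types 0)).flatten := by
    rw [hps, List.map_flatten, List.map_map]
    congr 1
    exact List.map_congr_left (fun t _ => PySem.List.map_snd_enumerate _ _)
  have hndps : (ps.map (·.2)).Nodup := by
    rw [hps2, List.nodup_flatten]
    refine ⟨fun l hl => ?_, ?_⟩
    · obtain ⟨t, _, rfl⟩ := List.mem_map.mp hl
      exact pvIdxs_nodup t types 0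
    · rw [List.pairwise_map]
      refine hnd.imp ?_
      intro t t' hne j hj hj'
      exact hne (Option.some.inj ((pvIdxs_type t types j hj).symm.trans (pvIdxs_type t' types j hj')))
  have hcov : ∀ k : Nat, k < types.length → (k : Int) ∈ ps.map (·.2) := by
    intro k hk
    rw [hps2, List.mem_flatten]
    refine ⟨pvIdxs (types[k]) types 0,
      List.mem_map_of_mem (by rw [PySem.Set.mem_ofList]; exact List.getElem_mem hk), ?_⟩
    exact (mem_pvIdxs _ types 0 k).mpr ⟨k, List.getElem?_eq_getElem hk, by omega⟩
  -- apply the set-fold characterisation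
  have hfold : ∀ k : Nat,
      (List.foldl
          (fun cur q =>
            PySem.List.pySetD cur q.2
              (((PySem.Dict.mk (PySem.List.pyGetD cur q.2 [])).insert "ner"
                ((PySem.Dict.mk (PySem.List.pyGetD cur q.2 [])).getD "ner" "" ++ PySem.Int.toStr q.1)).items))
          ne ps)[k]? =
        if (k : Int) ∈ ps.map (·.2)
        then some (pvUpd (ne.getD k []) (((types.take k).count (types.getD k "") : Int)))
        else ne[k]? := by
    have h := pvSetFold
      (F := fun e i => ((PySem.Dict.mk e).insert "ner"
        ((PySem.Dict.mk e).getD "ner" "" ++ PySem.Int.toStr i)).items)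
      (g := fun k => pvUpd (ne.getD k []) (((types.take k).count (types.getD k "") : Int)))
      (base := ne) (dflt := ([] : List (String × String))) ps ne rfl hndps
      (fun p hp => ⟨(hmem p hp).1, by have := (hmem p hp).2.1; omega⟩)
      (fun p hp => rfl)
      (fun p hp e he => by
        obtain ⟨h0, h1, h2, h3⟩ := hmem p hp
        have hne' : ne.getD p.2.toNat [] = e := by
          rw [List.getD_eq_getElem?_getD, he]
          rfl
        rw [h3, ← hne']
        rfl)
    exact h
  -- elementwise comparison with pvBrec
  rw [hA, hB1]
  refine Eq.symm (List.ext_getElem? fun k => ?_)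
  rw [hfold k, pvBrec_getElem? ne [] k]
  by_cases hk : k < ne.length
  · rw [if_pos (hcov k (by omega))]
    rw [List.getElem?_eq_getElem hk]
    simp only [List.nil_append, List.length_nil, Nat.zero_add, Option.map_some]
    have e1 : ne.getD k [] = ne[k] := by
      rw [List.getD_eq_getElem?_getD, List.getElem?_eq_getElem hk]
      rfl
    have e2 : types.getD k "" = pvTypeOf ne[k] := by
      rw [List.getD_eq_getElem?_getD, ← hT, List.getElem?_map, List.getElem?_eq_getElem hk]
      rfl
    rw [e1, e2, hT]
  · have hnm : (k : Int) ∉ ps.map (·.2) := by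
      intro hm
      obtain ⟨p, hp, hpk⟩ := List.mem_map.mp hm
      have := (hmem p hp).2.1
      omega
    rw [if_neg hnm, List.getElem?_eq_none (Nat.le_of_not_lt hk)]
    simp
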